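-- pv_equiv track=rewrite | github.com/habeneyasu/fintech-app-customer-experience-analytics | src/analysis/thematic_analyzer.py | assign_theme_to_review
-- ===== SOURCE A (Python) =====
-- from typing import Dict, List, Tuple, Optional
--
-- def assign_theme_to_review(review_text: str, themes: Dict[str, List[str]]) -> List[str]:
--     """
--     Assign theme(s) to a review based on keyword matching.
--
--     Args:
--         review_text: Review text
--         themes: Dictionary of themes and their keywords
--
--     Returns:
--         List of assigned theme names
--     """
--     if not review_text:
--         return []
--
--     review_lower = review_text.lower()
--     assigned_themes = []
--
--     for theme, keywords in themes.items():
--         # Check if any keyword from this theme appears in the review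
--         for keyword in keywords:
--             if keyword.lower() in review_lower:
--                 assigned_themes.append(theme)
--                 break
--
--     return assigned_themes if assigned_themes else ['Other']
-- ===== SOURCE B (Python) =====
-- def assign_theme_to_review(review_text, themes):
--     """Assign theme(s) to a review based on keyword matching.
--
--     Lowers every keyword once, substring-tests each distinct lowered keyword
--     against the review exactly once to build a hit set, then selects themes
--     by set disjointness.
--     """
--     if not review_text:
--         return []
--     review_lower = review_text.lower()
--     lowered = [(theme, [k.lower() for k in kws]) for theme, kws in themes.items()]
--     distinct_keywords = dict.fromkeys(k for _, kws in lowered for k in kws)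
--     hits = {k for k in distinct_keywords if k in review_lower}
--     matched = [theme for theme, kws in lowered if not hits.isdisjoint(kws)]
--     return matched if matched else ['Other']
-- ===== Notes on version B (the rewrite author's own statement) =====
-- stated objective: alternative
-- what changed: A scans each theme's keyword list with an early-break substring test per keyword occurrence; B lowers all keywords once, substring-tests each DISTINCT lowered keyword against the review exactly once to build a hit set, then selects themes by set disjointness, so keywords shared between themes are tested only once.
import Mathlib
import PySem

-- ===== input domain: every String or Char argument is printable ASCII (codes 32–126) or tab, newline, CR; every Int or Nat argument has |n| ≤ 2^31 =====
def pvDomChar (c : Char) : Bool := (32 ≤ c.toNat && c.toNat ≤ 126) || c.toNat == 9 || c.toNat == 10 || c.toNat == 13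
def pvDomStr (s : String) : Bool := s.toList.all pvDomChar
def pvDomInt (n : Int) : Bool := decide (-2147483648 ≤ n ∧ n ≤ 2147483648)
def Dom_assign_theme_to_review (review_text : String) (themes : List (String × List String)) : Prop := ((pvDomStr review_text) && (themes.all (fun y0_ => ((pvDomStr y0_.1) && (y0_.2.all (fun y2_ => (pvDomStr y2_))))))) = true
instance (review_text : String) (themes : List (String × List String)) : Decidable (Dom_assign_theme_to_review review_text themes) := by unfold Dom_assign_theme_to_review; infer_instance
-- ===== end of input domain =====

-- B replaces A's per-theme early-break keyword scan by a one-shot hit set over the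
-- distinct lowered keywords, then selects themes by set membership (alternative algorithm).

-- ===== PORT A =====
-- inner 'for keyword in keywords: if …: append; break' of A
def pvInnerA (review_lower : String) : List String → Bool
  | [] => false
  | k :: rest =>
    if PySem.Str.isIn (PySem.Str.lower k) review_lower then true
    else pvInnerA review_lower rest

def assign_theme_to_review (review_text : String) (themes : List (String × List String)) : List String :=
  if review_text = "" then []
  else
    let review_lower := PySem.Str.lower review_text
    let assigned_themes := themes.foldl
      (fun acc p => if pvInnerA review_lower p.2 then acc ++ [p.1] else acc) []
    if assigned_themes = [] then ["Other"] else assigned_themes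

-- ===== PORT B =====
def assign_theme_to_review_alt (review_text : String) (themes : List (String × List String)) : List String :=
  if review_text = "" then []
  else
    let review_lower := PySem.Str.lower review_text
    let lowered := themes.map (fun p => (p.1, p.2.map PySem.Str.lower))
    let distinct_keywords := PySem.List.dedup (lowered.flatMap (fun p => p.2))
    let hits := distinct_keywords.filter (fun k => PySem.Str.isIn k review_lower)
    -- 'not hits.isdisjoint(kws)' = some element of kws is in hits
    let matched := (lowered.filter
      (fun p => p.2.any (fun k => hits.contains k))).map (fun p => p.1)
    if matched = [] then ["Other"] else matched

-- ===== PRECONDITION & SPEC =====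
def Spec_assign_theme_to_review (review_text : String) (themes : List (String × List String)) (out : List String) : Prop := out = assign_theme_to_review_alt review_text themes
instance (review_text : String) (themes : List (String × List String)) (out : List String) : Decidable (Spec_assign_theme_to_review review_text themes out) := by unfold Spec_assign_theme_to_review; infer_instance

-- ===== CLAIM (what is proved, stated in full; the proofs are below) =====
def Claim_equal_assign_theme_to_review : Prop := ∀ (review_text : String) (themes : List (String × List String)), Dom_assign_theme_to_review review_text themes → Spec_assign_theme_to_review review_text themes (assign_theme_to_review review_text themes)

-- ===== LEMMAS AND PROOFS =====

-- A's early-break inner loop is the 'any' of its test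
theorem pvInnerA_eq_any (rl : String) (ks : List String) :
    pvInnerA rl ks = ks.any (fun k => PySem.Str.isIn (PySem.Str.lower k) rl) := by
  induction ks with
  | nil => rfl
  | cons k t ih =>
    simp only [pvInnerA, List.any_cons, ← ih]
    cases PySem.Str.isIn (PySem.Str.lower k) rl <;> simp

-- membership in B's hit set decides A's substring test, for any keyword of the themes
theorem pv_hits_contains (rl : String) (themes : List (String × List String))
    (k : String) (p : String × List String) (hp : p ∈ themes) (hk : k ∈ p.2) :
    ((PySem.List.dedup ((themes.flatMap (fun p => p.2)).map PySem.Str.lower)).filter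
        (fun s => PySem.Str.isIn s rl)).contains (PySem.Str.lower k)
      = PySem.Str.isIn (PySem.Str.lower k) rl := by
  have hmem : PySem.Str.lower k
      ∈ PySem.List.dedup ((themes.flatMap (fun p => p.2)).map PySem.Str.lower) := by
    rw [PySem.List.mem_dedup]
    exact List.mem_map_of_mem (List.mem_flatMap.mpr ⟨p, hp, hk⟩)
  by_cases h : PySem.Str.isIn (PySem.Str.lower k) rl = true
  · simp only [h, List.contains_eq_mem, decide_eq_true_eq]
    exact List.mem_filter.mpr ⟨hmem, h⟩
  · rw [Bool.eq_false_iff.mpr h, ← Bool.not_eq_true, List.contains_eq_mem, decide_eq_true_eq]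
    intro hin
    exact h (List.mem_filter.mp hin).2

-- ===== VERDICT (by name: the statement is the Claim_ definition above) =====
theorem assign_theme_to_review_spec : Claim_equal_assign_theme_to_review := by
  intro review_text themes _
  unfold Spec_assign_theme_to_review assign_theme_to_review assign_theme_to_review_alt
  by_cases h : review_text = ""
  · simp [h]
  · simp only [if_neg h]
    rw [PySem.List.foldl_append_if, List.nil_append]
    simp only [List.filter_map, List.map_map, List.any_map, List.flatMap_map,
      ← List.map_flatMap, Function.comp_def]
    have hf : themes.filter (fun p => pvInnerA (PySem.Str.lower review_text) p.2)
        = themes.filter (fun p => p.2.any (fun k =>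
            ((PySem.List.dedup ((themes.flatMap (fun p => p.2)).map PySem.Str.lower)).filter
              (fun s => PySem.Str.isIn s (PySem.Str.lower review_text))).contains
                (PySem.Str.lower k))) := by
      apply List.filter_congr
      intro p hp
      rw [pvInnerA_eq_any]
      exact PySem.List.any_congr_mem
        (fun k hk => (pv_hits_contains (PySem.Str.lower review_text) themes k p hp hk).symm)
    rw [hf]
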